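-- pv_equiv track=rewrite | github.com/ettoc00/kbprojection | scripts/analysis/compare_sick_results.py | pairwise_outcomes
-- ===== SOURCE A (Python) =====
-- from typing import Any, Dict, Iterable, List, Optional, Sequence, Tuple
--
-- SOLVED_KB_STATUSES = {"raw_kb_solved", "normalised_kb_solved"}
--
-- def status_sets(items: Dict[str, Dict[str, Any]]) -> Dict[str, set[str]]:
--     out: Dict[str, set[str]] = {}
--     for key, item in items.items():
--         out.setdefault(str(item.get("final_status") or "unknown"), set()).add(key)
--     return out
--
-- def solved_kb_set(items: Dict[str, Dict[str, Any]]) -> set[str]: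
--     return {
--         key
--         for key, item in items.items()
--         if item.get("final_status") in SOLVED_KB_STATUSES
--     }
--
-- def pairwise_outcomes(models: Dict[str, Dict[str, Dict[str, Any]]]) -> Dict[str, Any]:
--     sets = {name: status_sets(items) for name, items in models.items()}
--     kb_solved = {name: solved_kb_set(items) for name, items in models.items()}
--     rows = {}
--     names = list(models)
--     for i, left in enumerate(names):
--         for right in names[i + 1 :]:
--             rows[f"{left}_vs_{right}"] = {
--                 "kb_solved_overlap": len(kb_solved[left] & kb_solved[right]),
--                 f"kb_solved_only_{left}": len(kb_solved[left] - kb_solved[right]),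
--                 f"kb_solved_only_{right}": len(kb_solved[right] - kb_solved[left]),
--                 "raw_overlap": len(sets[left].get("raw_kb_solved", set()) & sets[right].get("raw_kb_solved", set())),
--                 f"raw_only_{left}": len(sets[left].get("raw_kb_solved", set()) - sets[right].get("raw_kb_solved", set())),
--                 f"raw_only_{right}": len(sets[right].get("raw_kb_solved", set()) - sets[left].get("raw_kb_solved", set())),
--                 "normalised_overlap": len(
--                     sets[left].get("normalised_kb_solved", set())
--                     & sets[right].get("normalised_kb_solved", set())
--                 ),
--                 f"normalised_only_{left}": len(
--                     sets[left].get("normalised_kb_solved", set())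
--                     - sets[right].get("normalised_kb_solved", set())
--                 ),
--                 f"normalised_only_{right}": len(
--                     sets[right].get("normalised_kb_solved", set())
--                     - sets[left].get("normalised_kb_solved", set())
--                 ),
--             }
--     return rows
-- ===== SOURCE B (Python) =====
-- # Key-centric co-occurrence counting: one pass builds an inverted index
-- # (category, key) -> solver names and per-model category sizes; overlaps are
-- # counted from the index, no set objects or set operations at all.
-- def pairwise_outcomes(models):
--     names = []
--     sizes = {}      # (name, cat) -> how many keys this model solved in cat
--     solvers = {}    # (cat, key) -> model names (in model order) that solved key
--     for name, items in models.items():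
--         names.append(name)
--         for key, item in items.items():
--             status = item.get("final_status")
--             if status == "raw_kb_solved":
--                 cats = ("kb_solved", "raw")
--             elif status == "normalised_kb_solved":
--                 cats = ("kb_solved", "normalised")
--             else:
--                 continue
--             for cat in cats:
--                 sizes[name, cat] = sizes.get((name, cat), 0) + 1
--                 solvers.setdefault((cat, key), []).append(name)
--     overlaps = {}   # (left, right, cat) -> co-occurrence count over keys
--     for (cat, _key), lst in solvers.items():
--         for i, l in enumerate(lst):
--             for r in lst[i + 1:]:
--                 overlaps[l, r, cat] = overlaps.get((l, r, cat), 0) + 1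
--     rows = {}
--     for i, left in enumerate(names):
--         for right in names[i + 1:]:
--             row = {}
--             for cat, over_label, only_label in (
--                 ("kb_solved", "kb_solved_overlap", "kb_solved_only"),
--                 ("raw", "raw_overlap", "raw_only"),
--                 ("normalised", "normalised_overlap", "normalised_only"),
--             ):
--                 ov = overlaps.get((left, right, cat), 0)
--                 row[over_label] = ov
--                 row[f"{only_label}_{left}"] = sizes.get((left, cat), 0) - ov
--                 row[f"{only_label}_{right}"] = sizes.get((right, cat), 0) - ov
--             rows[f"{left}_vs_{right}"] = row
--     return rows
-- ===== Notes on version B (the rewrite author's own statement) =====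
-- stated objective: alternative
-- what changed: B drops set objects and pairwise set intersections/differences entirely: a single pass builds an inverted index (category, key) -> list of solver models plus per-model category sizes, pair overlaps are obtained by counting co-occurrences along each index bucket, and every 'only' entry is derived arithmetically as size - overlap.
import Mathlib
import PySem

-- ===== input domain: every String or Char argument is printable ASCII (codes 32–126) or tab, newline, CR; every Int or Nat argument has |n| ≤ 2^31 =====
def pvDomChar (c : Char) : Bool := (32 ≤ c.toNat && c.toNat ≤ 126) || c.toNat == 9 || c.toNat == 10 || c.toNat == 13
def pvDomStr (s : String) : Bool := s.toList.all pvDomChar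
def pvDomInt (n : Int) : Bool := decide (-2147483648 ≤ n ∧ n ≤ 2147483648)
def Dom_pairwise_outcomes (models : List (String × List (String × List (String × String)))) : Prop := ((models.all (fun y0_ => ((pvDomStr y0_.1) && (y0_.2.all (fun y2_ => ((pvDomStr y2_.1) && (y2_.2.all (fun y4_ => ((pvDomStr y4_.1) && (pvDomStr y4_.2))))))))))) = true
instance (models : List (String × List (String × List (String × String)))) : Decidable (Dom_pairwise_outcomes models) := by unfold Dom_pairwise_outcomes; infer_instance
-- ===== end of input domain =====

-- B abandons set objects entirely: one pass builds an inverted index (category, key) -> solver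
-- names plus per-model category sizes, overlaps are co-occurrence counts read off that index,
-- and the "only" entries are size - overlap. (Return-value equivalence; no argument is mutated.)

-- ===== PORT A =====

-- str(item.get("final_status") or "unknown"): None and "" are falsy, any other string is itself
def pvStatusName (o : Option String) : String :=
  match o with
  | none => "unknown"
  | some s => if s == "" then "unknown" else s

def SOLVED_KB_STATUSES : PySem.Set String := PySem.Set.ofList ["raw_kb_solved", "normalised_kb_solved"]

-- out.setdefault(status, set()).add(key) mutates the set stored at status in place,
-- i.e. out[status] = out.get(status, set()) ∪ {key}: exactly Dict.modify
def status_sets (items : PySem.Dict String (PySem.Dict String String)) : PySem.Dict String (PySem.Set String) :=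
  items.items.foldl
    (fun out kv => out.modify (pvStatusName (kv.2.get? "final_status")) PySem.Set.empty
      (fun s => PySem.Set.add s kv.1))
    PySem.Dict.empty

-- 'item.get("final_status") in SOLVED_KB_STATUSES': None is never in a set of strings
def solved_kb_set (items : PySem.Dict String (PySem.Dict String String)) : PySem.Set String :=
  PySem.Set.ofList
    ((items.items.filter (fun kv =>
        match kv.2.get? "final_status" with
        | some s => SOLVED_KB_STATUSES.contains s
        | none => false)).map (·.1))

def pairwise_outcomes (models : List (String × List (String × List (String × String)))) : List (String × List (String × Int)) :=
  let md : PySem.Dict String (PySem.Dict String (PySem.Dict String String)) :=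
    PySem.Dict.ofList (models.map (fun p => (p.1, PySem.Dict.ofList (p.2.map (fun q => (q.1, PySem.Dict.ofList q.2))))))
  let sets := PySem.Dict.ofList (md.items.map (fun p => (p.1, status_sets p.2)))
  let kb := PySem.Dict.ofList (md.items.map (fun p => (p.1, solved_kb_set p.2)))
  let names := md.keys
  let rows : PySem.Dict String (PySem.Dict String Int) :=
    (PySem.List.enumerate names).foldl (fun rows il =>
      (PySem.List.slice names (some (il.1 + 1)) none).foldl (fun rows right =>
        let left := il.2
        let kl := kb.getD left PySem.Set.empty
        let kr := kb.getD right PySem.Set.empty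
        let sl := sets.getD left PySem.Dict.empty
        let sr := sets.getD right PySem.Dict.empty
        let rl := sl.getD "raw_kb_solved" PySem.Set.empty
        let rr := sr.getD "raw_kb_solved" PySem.Set.empty
        let nl := sl.getD "normalised_kb_solved" PySem.Set.empty
        let nr := sr.getD "normalised_kb_solved" PySem.Set.empty
        rows.insert (left ++ "_vs_" ++ right)
          (PySem.Dict.empty.insert "kb_solved_overlap" (PySem.Set.len (PySem.Set.inter kl kr))
            |>.insert ("kb_solved_only_" ++ left) (PySem.Set.len (PySem.Set.diff kl kr))
            |>.insert ("kb_solved_only_" ++ right) (PySem.Set.len (PySem.Set.diff kr kl))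
            |>.insert "raw_overlap" (PySem.Set.len (PySem.Set.inter rl rr))
            |>.insert ("raw_only_" ++ left) (PySem.Set.len (PySem.Set.diff rl rr))
            |>.insert ("raw_only_" ++ right) (PySem.Set.len (PySem.Set.diff rr rl))
            |>.insert "normalised_overlap" (PySem.Set.len (PySem.Set.inter nl nr))
            |>.insert ("normalised_only_" ++ left) (PySem.Set.len (PySem.Set.diff nl nr))
            |>.insert ("normalised_only_" ++ right) (PySem.Set.len (PySem.Set.diff nr nl))))
      rows)
      PySem.Dict.empty
  rows.items.map (fun p => (p.1, p.2.items))

-- ===== PORT B =====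

-- the 'cats' tuple of Source B's first loop
def pvBCats (status : Option String) : List String :=
  if status == some "raw_kb_solved" then ["kb_solved", "raw"]
  else if status == some "normalised_kb_solved" then ["kb_solved", "normalised"]
  else []

-- the literal (cat, over_label, only_label) triple Source B's last loop iterates over
def pvCatSpec : List (String × String × String) :=
  [("kb_solved", "kb_solved_overlap", "kb_solved_only"),
   ("raw", "raw_overlap", "raw_only"),
   ("normalised", "normalised_overlap", "normalised_only")]

def pairwise_outcomes_alt (models : List (String × List (String × List (String × String)))) : List (String × List (String × Int)) :=
  let md : PySem.Dict String (PySem.Dict String (PySem.Dict String String)) :=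
    PySem.Dict.ofList (models.map (fun p => (p.1, PySem.Dict.ofList (p.2.map (fun q => (q.1, PySem.Dict.ofList q.2))))))
  -- loop 1: names, sizes[(name,cat)] += 1, solvers[(cat,key)].append(name)
  let st := md.items.foldl
    (fun (st : List String × PySem.Dict (String × String) Int × PySem.Dict (String × String) (List String)) nv =>
      (st.1 ++ [nv.1],
       nv.2.items.foldl
         (fun sd kv =>
           (pvBCats (kv.2.get? "final_status")).foldl
             (fun sd cat =>
               (sd.1.modify (nv.1, cat) 0 (· + 1),
                sd.2.modify (cat, kv.1) [] (· ++ [nv.1])))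
             sd)
         st.2))
    (([] : List String), (PySem.Dict.empty : PySem.Dict (String × String) Int),
     (PySem.Dict.empty : PySem.Dict (String × String) (List String)))
  let names := st.1
  let sizes := st.2.1
  let solvers := st.2.2
  -- loop 2: co-occurrence counting over the inverted index
  let overlaps : PySem.Dict (String × String × String) Int :=
    solvers.items.foldl
      (fun ov ckl =>
        (PySem.List.enumerate ckl.2).foldl
          (fun ov il =>
            (PySem.List.slice ckl.2 (some (il.1 + 1)) none).foldl
              (fun ov r => ov.modify (il.2, r, ckl.1.1) 0 (· + 1))
              ov)
          ov)
      PySem.Dict.empty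
  -- loop 3: assemble the rows from the counters
  let rows : PySem.Dict String (PySem.Dict String Int) :=
    (PySem.List.enumerate names).foldl
      (fun rows il =>
        (PySem.List.slice names (some (il.1 + 1)) none).foldl
          (fun rows right =>
            let row := pvCatSpec.foldl
              (fun (row : PySem.Dict String Int) c =>
                let ov := overlaps.getD (il.2, right, c.1) 0
                ((row.insert c.2.1 ov).insert (c.2.2 ++ "_" ++ il.2) (sizes.getD (il.2, c.1) 0 - ov)).insert
                  (c.2.2 ++ "_" ++ right) (sizes.getD (right, c.1) 0 - ov))
              PySem.Dict.empty
            rows.insert (il.2 ++ "_vs_" ++ right) row)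
          rows)
      PySem.Dict.empty
  rows.items.map (fun p => (p.1, p.2.items))

-- ===== PRECONDITION & SPEC =====
def Spec_pairwise_outcomes (models : List (String × List (String × List (String × String)))) (out : List (String × List (String × Int))) : Prop := out = pairwise_outcomes_alt models
instance (models : List (String × List (String × List (String × String)))) (out : List (String × List (String × Int))) : Decidable (Spec_pairwise_outcomes models out) := by unfold Spec_pairwise_outcomes; infer_instance

-- ===== CLAIM (what is proved, stated in full; the proofs are below) =====
def Claim_equal_pairwise_outcomes : Prop := ∀ (models : List (String × List (String × List (String × String)))), Dom_pairwise_outcomes models → Spec_pairwise_outcomes models (pairwise_outcomes models)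

-- ===== LEMMAS AND PROOFS =====

-- ---------- generic machinery: the ordered-pairs list behind 'for i,l in enumerate(xs): for r in xs[i+1:]' ----------

def pvPairs {α : Type} : List α → List (α × α)
  | [] => []
  | x :: t => t.map (fun y => (x, y)) ++ pvPairs t

lemma pv_enum_slice_foldl_aux {α γ : Type} (xs : List α) :
    ∀ (ys : List α) (k : Nat) (f : γ → α → α → γ) (a : γ), ys.drop k = xs →
    (PySem.List.enumerate xs (k : Int)).foldl
        (fun acc il => (PySem.List.slice ys (some (il.1 + 1)) none).foldl (fun acc r => f acc il.2 r) acc) a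
      = (pvPairs xs).foldl (fun acc pr => f acc pr.1 pr.2) a := by
  induction xs with
  | nil => intro ys k f a h; rfl
  | cons x t ih =>
      intro ys k f a h
      have hcons : PySem.List.enumerate (x :: t) (k : Int) = ((k : Int), x) :: PySem.List.enumerate t ((k : Int) + 1) := rfl
      have hk1 : ((k : Int) + 1) = ((k + 1 : Nat) : Int) := by push_cast; ring
      have hslice : PySem.List.slice ys (some ((k : Int) + 1)) none = t := by
        rw [PySem.List.slice_from ys (by positivity)]
        have : ((k : Int) + 1).toNat = k + 1 := by omega
        rw [this, ← List.drop_drop, h]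
        rfl
      rw [hcons, List.foldl_cons, hslice, pvPairs, List.foldl_append, List.foldl_map, hk1,
        ih ys (k + 1) f _ (by rw [← List.drop_drop, h]; rfl)]

lemma pv_enum_slice_foldl {α γ : Type} (xs : List α) (f : γ → α → α → γ) (a : γ) :
    (PySem.List.enumerate xs).foldl
        (fun acc il => (PySem.List.slice xs (some (il.1 + 1)) none).foldl (fun acc r => f acc il.2 r) acc) a
      = (pvPairs xs).foldl (fun acc pr => f acc pr.1 pr.2) a :=
  pv_enum_slice_foldl_aux xs xs 0 f a rfl

lemma pvPairs_map {α β : Type} (f : α → β) (l : List α) :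
    pvPairs (l.map f) = (pvPairs l).map (Prod.map f f) := by
  induction l with
  | nil => rfl
  | cons x t ih => simp [pvPairs, ih, List.map_map, Function.comp_def, Prod.map]

lemma mem_pvPairs {α : Type} {a b : α} :
    ∀ {M : List α}, (a, b) ∈ pvPairs M → ∃ M1 M2 M3, M = M1 ++ a :: M2 ++ b :: M3 := by
  intro M
  induction M with
  | nil => intro h; cases h
  | cons x t ih =>
      intro h
      rw [pvPairs, List.mem_append] at h
      rcases h with h | h
      · obtain ⟨y, hy, hxy⟩ := List.mem_map.mp h
        obtain ⟨ha, hb⟩ := Prod.mk.inj hxy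
        obtain ⟨t1, t2, rfl⟩ := List.append_of_mem hy
        exact ⟨[], t1, t2, by simp [← ha, ← hb]⟩
      · obtain ⟨M1, M2, M3, rfl⟩ := ih h
        exact ⟨x :: M1, M2, M3, rfl⟩

lemma count_map_pair {α : Type} [BEq α] [LawfulBEq α] [DecidableEq α] (t : List α) (x l r : α) :
    ((t.map (fun y => (x, y))).count (l, r)) = if x = l then t.count r else 0 := by
  by_cases hx : x = l
  · subst hx
    rw [if_pos rfl]
    exact List.count_map_of_injective t (fun y => (x, y)) (fun a b h => (Prod.mk.inj h).2) r
  · rw [if_neg hx]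
    refine List.count_eq_zero.mpr (fun hm => ?_)
    obtain ⟨y, _, hxy⟩ := List.mem_map.mp hm
    exact hx (Prod.mk.inj hxy).1

lemma count_pvPairs_not_mem {α : Type} [BEq α] [LawfulBEq α] [DecidableEq α] {l : α} (r : α) {A : List α}
    (h : l ∉ A) : (pvPairs A).count (l, r) = 0 := by
  induction A with
  | nil => rfl
  | cons x t ih =>
      rw [pvPairs, List.count_append, count_map_pair,
        if_neg (fun hx => h (by simp [hx])),
        ih (fun hm => h (List.mem_cons_of_mem _ hm))]

lemma count_pvPairs_append {α : Type} [BEq α] [LawfulBEq α] [DecidableEq α] (A B : List α) (l r : α) :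
    (pvPairs (A ++ B)).count (l, r)
      = (pvPairs A).count (l, r) + A.count l * B.count r + (pvPairs B).count (l, r) := by
  induction A with
  | nil => simp [pvPairs]
  | cons x t ih =>
      rw [List.cons_append, pvPairs, pvPairs, List.count_append, List.count_append,
        count_map_pair, count_map_pair, List.count_append, ih, List.count_cons]
      by_cases hx : x = l <;> simp [hx] <;> ring

-- a nodup list counts every element at most once
lemma count_of_nodup {α : Type} [BEq α] [LawfulBEq α] {l : List α} (h : l.Nodup) (c : α) :
    l.count c = if c ∈ l then 1 else 0 := by
  by_cases hc : c ∈ l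
  · rw [if_pos hc, List.count_eq_one_of_mem h hc]
  · rw [if_neg hc, List.count_eq_zero_of_not_mem hc]

-- ---------- category plumbing shared by both sides ----------

def pvRawP (kv : String × PySem.Dict String String) : Bool :=
  kv.2.get? "final_status" == some "raw_kb_solved"
def pvNormP (kv : String × PySem.Dict String String) : Bool :=
  kv.2.get? "final_status" == some "normalised_kb_solved"

def pvCats (kv : String × PySem.Dict String String) : List String := pvBCats (kv.2.get? "final_status")

def pvCatP (c : String) (kv : String × PySem.Dict String String) : Bool := (pvCats kv).contains c

-- the keys of v that fall in category c (in item order)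
def pvKeys (c : String) (v : PySem.Dict String (PySem.Dict String String)) : List String :=
  (v.items.filter (pvCatP c)).map (·.1)

-- whether v has key k in category c
def pvHas (c k : String) (v : PySem.Dict String (PySem.Dict String String)) : Bool :=
  v.items.any (fun kv => kv.1 == k && pvCatP c kv)

lemma pvCats_eq (kv : String × PySem.Dict String String) :
    pvCats kv = if pvRawP kv then ["kb_solved", "raw"]
      else if pvNormP kv then ["kb_solved", "normalised"] else [] := rfl

lemma pvCats_nodup (kv : String × PySem.Dict String String) : (pvCats kv).Nodup := by
  rw [pvCats_eq]; split_ifs <;> decide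

lemma rawP_normP_contra (kv : String × PySem.Dict String String)
    (h1 : pvRawP kv = true) (h2 : pvNormP kv = true) : False := by
  simp only [pvRawP, pvNormP, beq_iff_eq] at h1 h2
  rw [h1] at h2
  exact absurd (Option.some.inj h2) (by decide)

lemma catP_kb (kv : String × PySem.Dict String String) :
    pvCatP "kb_solved" kv = (pvRawP kv || pvNormP kv) := by
  unfold pvCatP
  rw [pvCats_eq]
  cases h1 : pvRawP kv <;> cases h2 : pvNormP kv <;> simp [h1, h2]

lemma catP_raw (kv : String × PySem.Dict String String) : pvCatP "raw" kv = pvRawP kv := by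
  unfold pvCatP
  rw [pvCats_eq]
  cases h1 : pvRawP kv <;> cases h2 : pvNormP kv <;> simp [h1, h2]

lemma catP_norm (kv : String × PySem.Dict String String) : pvCatP "normalised" kv = pvNormP kv := by
  unfold pvCatP
  rw [pvCats_eq]
  cases h1 : pvRawP kv <;> cases h2 : pvNormP kv <;> simp [h1, h2]
  exact (rawP_normP_contra kv h1 h2).elim

lemma mem_pvKeys {c k : String} {v : PySem.Dict String (PySem.Dict String String)} :
    k ∈ pvKeys c v ↔ pvHas c k v = true := by
  unfold pvKeys pvHas
  rw [List.mem_map, List.any_eq_true]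
  constructor
  · rintro ⟨kv, hkv, rfl⟩
    exact ⟨kv, List.mem_of_mem_filter hkv, by simp [List.of_mem_filter hkv]⟩
  · rintro ⟨kv, hkv, hp⟩
    simp only [Bool.and_eq_true, beq_iff_eq] at hp
    exact ⟨kv, List.mem_filter.mpr ⟨hkv, hp.2⟩, hp.1⟩

lemma nodup_pvKeys {c : String} {v : PySem.Dict String (PySem.Dict String String)}
    (hv : v.keys.Nodup) : (pvKeys c v).Nodup := by
  have h : List.Sublist (pvKeys c v) (v.items.map (fun p => p.1)) := List.Sublist.map _ List.filter_sublist
  have hk : v.keys = v.items.map (fun p => p.1) := rfl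
  exact h.nodup (hk ▸ hv)

-- ---------- A-side characterisations (lookup plumbing) ----------

lemma statusName_beq (o : Option String) (c : String) (h1 : c ≠ "unknown") (h2 : c ≠ "") :
    (pvStatusName o == c) = (o == some c) := by
  apply Bool.eq_iff_iff.mpr
  cases o with
  | none =>
      simp only [pvStatusName, beq_iff_eq]
      constructor
      · intro h; exact absurd h.symm h1
      · intro h; cases h
  | some s =>
      by_cases hs : s = ""
      · subst hs
        simp only [pvStatusName, beq_iff_eq]
        constructor
        · intro h
          simp only [if_pos] at h
          exact absurd h.symm h1
        · intro h
          cases h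
          exact absurd rfl h2
      · simp only [pvStatusName, beq_iff_eq, Option.some.injEq]
        rw [if_neg (by simpa using hs)]

lemma solved_contains (o : Option String) :
    (match o with
      | some s => SOLVED_KB_STATUSES.contains s
      | none => false) = ((o == some "raw_kb_solved") || (o == some "normalised_kb_solved")) := by
  cases o with
  | none => rfl
  | some s =>
      by_cases h1 : s = "raw_kb_solved" <;> by_cases h2 : s = "normalised_kb_solved" <;>
        simp [SOLVED_KB_STATUSES, PySem.Set.ofList, PySem.Set.add, PySem.Set.contains, h1, h2]

lemma bucket_foldl (L : List (String × PySem.Dict String String))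
    (d : PySem.Dict String (PySem.Set String)) (c : String) :
    (L.foldl
        (fun out kv => out.modify (pvStatusName (kv.2.get? "final_status")) PySem.Set.empty
          (fun s => PySem.Set.add s kv.1))
        d).getD c PySem.Set.empty
      = ((L.filter (fun kv => pvStatusName (kv.2.get? "final_status") == c)).map (·.1)).foldl
          PySem.Set.add (d.getD c PySem.Set.empty) := by
  induction L generalizing d with
  | nil => rfl
  | cons kv L ih =>
      simp only [List.foldl_cons, List.filter_cons]
      by_cases h : pvStatusName (kv.2.get? "final_status") = c
      · rw [if_pos (by simp [h]), List.map_cons, List.foldl_cons, ih,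
          PySem.Dict.getD_modify, if_pos h.symm, h]
      · rw [if_neg (by simp [h]), ih, PySem.Dict.getD_modify, if_neg (fun hc => h hc.symm)]

lemma bucket_eq (v : PySem.Dict String (PySem.Dict String String)) (c : String)
    (h1 : c ≠ "unknown") (h2 : c ≠ "") :
    (status_sets v).getD c PySem.Set.empty
      = PySem.Set.ofList ((v.items.filter (fun kv => kv.2.get? "final_status" == some c)).map (·.1)) := by
  unfold status_sets
  rw [bucket_foldl, PySem.Dict.getD_empty,
    show (PySem.Set.empty : PySem.Set String) = ([] : List String) from rfl,
    ← PySem.Set.ofList_eq_foldl]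
  congr 2
  apply List.filter_congr
  intro kv _
  exact statusName_beq _ _ h1 h2

lemma solved_kb_set_eq (v : PySem.Dict String (PySem.Dict String String)) :
    solved_kb_set v = PySem.Set.ofList (pvKeys "kb_solved" v) := by
  unfold solved_kb_set pvKeys
  congr 2
  apply List.filter_congr
  intro kv _
  rw [catP_kb]
  exact solved_contains _

lemma bucket_raw (v : PySem.Dict String (PySem.Dict String String)) :
    (status_sets v).getD "raw_kb_solved" PySem.Set.empty = PySem.Set.ofList (pvKeys "raw" v) := by
  rw [bucket_eq v _ (by decide) (by decide)]
  unfold pvKeys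
  congr 2
  apply List.filter_congr
  intro kv _
  rw [catP_raw]
  rfl

lemma bucket_norm (v : PySem.Dict String (PySem.Dict String String)) :
    (status_sets v).getD "normalised_kb_solved" PySem.Set.empty = PySem.Set.ofList (pvKeys "normalised" v) := by
  rw [bucket_eq v _ (by decide) (by decide)]
  unfold pvKeys
  congr 2
  apply List.filter_congr
  intro kv _
  rw [catP_norm]
  rfl

lemma length_filter_split (t : PySem.Set String) (s : List String) :
    (s.filter (fun x => PySem.Set.contains t x)).length
      + (s.filter (fun x => !PySem.Set.contains t x)).length = s.length := by
  induction s with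
  | nil => rfl
  | cons x s ih =>
      rw [List.filter_cons, List.filter_cons]
      cases h : PySem.Set.contains t x with
      | true =>
          rw [if_pos (by simp), if_neg (by simp)]
          simp only [List.length_cons]
          omega
      | false =>
          rw [if_neg (by simp), if_pos (by simp)]
          simp only [List.length_cons]
          omega

lemma diff_len (s t : PySem.Set String) :
    PySem.Set.len (PySem.Set.diff s t) = PySem.Set.len s - PySem.Set.len (PySem.Set.inter s t) := by
  have h := length_filter_split t s
  simp only [PySem.Set.len, PySem.Set.diff, PySem.Set.inter]
  omega

lemma inter_len_comm (s t : PySem.Set String) (hs : s.Nodup) (ht : t.Nodup) :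
    PySem.Set.len (PySem.Set.inter s t) = PySem.Set.len (PySem.Set.inter t s) := by
  have hp : (PySem.Set.inter s t).Perm (PySem.Set.inter t s) := by
    rw [List.perm_ext_iff_of_nodup (PySem.Set.nodup_inter _ _ hs) (PySem.Set.nodup_inter _ _ ht)]
    intro x
    rw [PySem.Set.mem_inter, PySem.Set.mem_inter]
    exact and_comm
  simp [PySem.Set.len, hp.length_eq]

lemma getD_map_ofList {V W : Type} (L : List (String × V)) (f : V → W) (k : String) (v : V) (d0 : W)
    (hnd : (L.map (fun p => p.1)).Nodup) (hm : (k, v) ∈ L) :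
    (PySem.Dict.ofList (L.map (fun p => (p.1, f p.2)))).getD k d0 = f v := by
  have h := PySem.Dict.items_foldl_insert_fresh (l := L.map (fun p => (p.1, f p.2)))
    (k := Prod.fst) (v := Prod.snd) (d := PySem.Dict.empty)
    (fun a _ => by simp)
    (by simpa [List.map_map, Function.comp] using hnd)
  have hitems : (PySem.Dict.ofList (L.map (fun p => (p.1, f p.2)))).items
      = L.map (fun p => (p.1, f p.2)) :=
    calc (PySem.Dict.ofList (L.map (fun p => (p.1, f p.2)))).items
        = PySem.Dict.empty.items ++ (L.map (fun p => (p.1, f p.2))).map (fun a => (a.1, a.2)) := h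
      _ = L.map (fun p => (p.1, f p.2)) := by
          rw [show PySem.Dict.empty.items = ([] : List (String × W)) from rfl]
          simp [Function.comp_def]
  exact PySem.Dict.getD_of_mem_items _
    (by rw [hitems]; exact List.mem_map_of_mem hm)
    (PySem.Dict.nodup_keys_ofList _) d0

-- every value stored in an ofList-built dict is one of the supplied values
lemma mem_items_update_sub {κ ν : Type} [BEq κ] [LawfulBEq κ] :
    ∀ (l : List (κ × ν)) (d : PySem.Dict κ ν) {p : κ × ν},
      p ∈ (d.update l).items → p ∈ d.items ∨ p ∈ l := by
  intro l
  induction l with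
  | nil => intro d p h; exact Or.inl h
  | cons q t ih =>
      intro d p h
      rcases ih (d.insert q.1 q.2) h with h' | h'
      · rcases (PySem.Dict.mem_items_insert _ _ _ _).mp h' with h'' | h''
        · exact Or.inr (by simp [h''])
        · exact Or.inl h''.1
      · exact Or.inr (List.mem_cons_of_mem _ h')

-- every item of an ofList-built dict is one of the supplied pairs
lemma mem_items_ofList_sub {κ ν : Type} [BEq κ] [LawfulBEq κ] (l : List (κ × ν)) {p : κ × ν}
    (h : p ∈ (PySem.Dict.ofList l).items) : p ∈ l := by
  rcases mem_items_update_sub l PySem.Dict.empty h with h' | h'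
  · cases h'
  · exact h'

-- ---------- B-side characterisations ----------

-- the flattened event stream of Source B's first loop: one (name, key, cat) triple per update
def pvEv (nv : String × PySem.Dict String (PySem.Dict String String)) : List (String × String × String) :=
  nv.2.items.flatMap (fun kv => (pvCats kv).map (fun c => (nv.1, kv.1, c)))

def pvE (L : List (String × PySem.Dict String (PySem.Dict String String))) : List (String × String × String) :=
  L.flatMap pvEv

def pvKE1 (L : List (String × PySem.Dict String (PySem.Dict String String))) : List (String × String) :=
  (pvE L).map (fun e => (e.1, e.2.2))

def pvKE2 (L : List (String × PySem.Dict String (PySem.Dict String String))) : List ((String × String) × String) :=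
  (pvE L).map (fun e => ((e.2.2, e.2.1), e.1))

-- loop 1 of port B, split into its three independent accumulators
lemma loop1_eq (L : List (String × PySem.Dict String (PySem.Dict String String))) :
    L.foldl
      (fun (st : List String × PySem.Dict (String × String) Int × PySem.Dict (String × String) (List String)) nv =>
        (st.1 ++ [nv.1],
         nv.2.items.foldl
           (fun sd kv =>
             (pvBCats (kv.2.get? "final_status")).foldl
               (fun sd cat =>
                 (sd.1.modify (nv.1, cat) 0 (· + 1),
                  sd.2.modify (cat, kv.1) [] (· ++ [nv.1])))
               sd)
           st.2))
      (([] : List String), (PySem.Dict.empty : PySem.Dict (String × String) Int),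
       (PySem.Dict.empty : PySem.Dict (String × String) (List String)))
    = (L.map (·.1),
       (pvKE1 L).foldl (fun d x => d.modify x 0 (· + 1)) PySem.Dict.empty,
       (pvKE2 L).foldl (fun d p => d.modify p.1 [] (· ++ [p.2])) PySem.Dict.empty) := by
  rw [PySem.List.foldl_prod_mk
    (f := fun ns (nv : String × PySem.Dict String (PySem.Dict String String)) => ns ++ [nv.1])
    (g := fun (sd : PySem.Dict (String × String) Int × PySem.Dict (String × String) (List String)) nv =>
      nv.2.items.foldl
        (fun sd kv =>
          (pvBCats (kv.2.get? "final_status")).foldl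
            (fun sd cat =>
              (sd.1.modify (nv.1, cat) 0 (· + 1),
               sd.2.modify (cat, kv.1) [] (· ++ [nv.1])))
            sd)
        sd)]
  simp only [PySem.List.foldl_append_singleton_eq_map, List.nil_append]
  have hg : ∀ (sd : PySem.Dict (String × String) Int × PySem.Dict (String × String) (List String))
      (nv : String × PySem.Dict String (PySem.Dict String String)),
      nv.2.items.foldl
        (fun sd kv =>
          (pvBCats (kv.2.get? "final_status")).foldl
            (fun sd cat =>
              (sd.1.modify (nv.1, cat) 0 (· + 1),
               sd.2.modify (cat, kv.1) [] (· ++ [nv.1])))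
            sd)
        sd
      = (pvEv nv).foldl
          (fun sd e => (sd.1.modify (e.1, e.2.2) 0 (· + 1), sd.2.modify (e.2.2, e.2.1) [] (· ++ [e.1])))
          sd := by
    intro sd nv
    rw [pvEv, List.foldl_flatMap]
    apply PySem.List.foldl_congr_mem
    intro acc kv _
    rw [List.foldl_map]
    rfl
  have h2 : L.foldl
      (fun sd nv =>
        nv.2.items.foldl
          (fun sd kv =>
            (pvBCats (kv.2.get? "final_status")).foldl
              (fun sd cat =>
                (sd.1.modify (nv.1, cat) 0 (· + 1),
                 sd.2.modify (cat, kv.1) [] (· ++ [nv.1])))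
              sd)
          sd)
      ((PySem.Dict.empty : PySem.Dict (String × String) Int),
       (PySem.Dict.empty : PySem.Dict (String × String) (List String)))
      = (pvE L).foldl
          (fun sd e => (sd.1.modify (e.1, e.2.2) 0 (· + 1), sd.2.modify (e.2.2, e.2.1) [] (· ++ [e.1])))
          ((PySem.Dict.empty : PySem.Dict (String × String) Int),
           (PySem.Dict.empty : PySem.Dict (String × String) (List String))) := by
    rw [pvE, List.foldl_flatMap]
    apply PySem.List.foldl_congr_mem
    intro acc nv _
    exact hg acc nv
  rw [h2, PySem.List.foldl_prod_mk
    (f := fun (d : PySem.Dict (String × String) Int) (e : String × String × String) =>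
      d.modify (e.1, e.2.2) 0 (· + 1))
    (g := fun (d : PySem.Dict (String × String) (List String)) (e : String × String × String) =>
      d.modify (e.2.2, e.2.1) [] (· ++ [e.1]))]
  rw [pvKE1, pvKE2, List.foldl_map, List.foldl_map]

-- loop 2 of port B as one counting fold over a flattened pair stream
def pvP (solvers : PySem.Dict (String × String) (List String)) : List (String × String × String) :=
  solvers.items.flatMap (fun ckl => (pvPairs ckl.2).map (fun pr => (pr.1, pr.2, ckl.1.1)))

lemma loop2_eq (solvers : PySem.Dict (String × String) (List String)) :
    solvers.items.foldl
      (fun ov ckl =>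
        (PySem.List.enumerate ckl.2).foldl
          (fun ov il =>
            (PySem.List.slice ckl.2 (some (il.1 + 1)) none).foldl
              (fun ov r => ov.modify (il.2, r, ckl.1.1) 0 (· + 1))
              ov)
          ov)
      (PySem.Dict.empty : PySem.Dict (String × String × String) Int)
    = (pvP solvers).foldl (fun d x => d.modify x 0 (· + 1)) PySem.Dict.empty := by
  rw [pvP, List.foldl_flatMap]
  apply PySem.List.foldl_congr_mem
  intro acc ckl _
  rw [List.foldl_map,
    pv_enum_slice_foldl ckl.2 (fun ov l r => ov.modify (l, r, ckl.1.1) 0 (· + 1)) acc]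

-- ---------- the counting arguments ----------

-- Nat 0/1 sums are countP
lemma sum_ite_one_zero_nat {α : Type} (p : α → Bool) (xs : List α) :
    (xs.map (fun x => if p x then 1 else 0)).sum = xs.countP p := by
  induction xs with
  | nil => rfl
  | cons x t ih =>
      rw [List.map_cons, List.sum_cons, ih, List.countP_cons]
      by_cases h : p x <;> simp [h] <;> omega

lemma pvKE1_cons (nv : String × PySem.Dict String (PySem.Dict String String))
    (t : List (String × PySem.Dict String (PySem.Dict String String))) :
    pvKE1 (nv :: t) = (pvEv nv).map (fun e => (e.1, e.2.2)) ++ pvKE1 t := by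
  simp [pvKE1, pvE, List.flatMap_cons]

lemma fst_of_mem_pvEv {nv : String × PySem.Dict String (PySem.Dict String String)}
    {e : String × String × String} (h : e ∈ pvEv nv) : e.1 = nv.1 := by
  rw [pvEv, List.mem_flatMap] at h
  obtain ⟨kv, _, hm⟩ := h
  obtain ⟨c', _, rfl⟩ := List.mem_map.mp hm
  rfl

lemma count_evk_ne (nv : String × PySem.Dict String (PySem.Dict String String))
    (m c : String) (h : nv.1 ≠ m) :
    ((pvEv nv).map (fun e => (e.1, e.2.2))).count (m, c) = 0 := by
  refine List.count_eq_zero.mpr (fun hm => ?_)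
  obtain ⟨e, he, hq⟩ := List.mem_map.mp hm
  exact h ((fst_of_mem_pvEv he) ▸ congrArg Prod.fst hq)

lemma count_evk_self (nv : String × PySem.Dict String (PySem.Dict String String)) (c : String) :
    ((pvEv nv).map (fun e => (e.1, e.2.2))).count (nv.1, c) = nv.2.items.countP (pvCatP c) := by
  rw [pvEv, List.map_flatMap, List.count_flatMap]
  have hcongr : ∀ kv ∈ nv.2.items,
      (List.count (nv.1, c) ∘ fun kv => ((pvCats kv).map (fun c' => (nv.1, kv.1, c'))).map (fun e => (e.1, e.2.2))) kv
        = if pvCatP c kv then 1 else 0 := by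
    intro kv _
    show (((pvCats kv).map (fun c' => (nv.1, kv.1, c'))).map (fun e => (e.1, e.2.2))).count (nv.1, c)
      = if pvCatP c kv then 1 else 0
    rw [List.map_map]
    have hmm : ((fun e : String × String × String => (e.1, e.2.2)) ∘ fun c' => (nv.1, kv.1, c'))
        = fun c' => (nv.1, c') := rfl
    rw [hmm, List.count_map_of_injective _ _ (fun a b h => (Prod.mk.inj h).2) c,
      count_of_nodup (pvCats_nodup kv) c]
    unfold pvCatP
    by_cases hc : c ∈ pvCats kv
    · rw [if_pos hc, if_pos (by simpa using hc)]
    · rw [if_neg hc, if_neg (by simpa using hc)]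
  rw [List.map_congr_left hcongr, sum_ite_one_zero_nat]

lemma count_KE1_zero (L : List (String × PySem.Dict String (PySem.Dict String String)))
    (m c : String) (h : m ∉ L.map (·.1)) : (pvKE1 L).count (m, c) = 0 := by
  induction L with
  | nil => rfl
  | cons nv t ih =>
      rw [pvKE1_cons, List.count_append,
        count_evk_ne nv m c (fun he => h (by simp [← he])),
        ih (fun hm => h (by simp at hm ⊢; exact Or.inr hm))]

lemma count_KE1_of (L : List (String × PySem.Dict String (PySem.Dict String String)))
    (m : String) (v : PySem.Dict String (PySem.Dict String String)) (c : String)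
    (hmem : (m, v) ∈ L) (hnd : (L.map (·.1)).Nodup) :
    (pvKE1 L).count (m, c) = v.items.countP (pvCatP c) := by
  induction L with
  | nil => cases hmem
  | cons nv t ih =>
      rw [List.map_cons, List.nodup_cons] at hnd
      rw [pvKE1_cons, List.count_append]
      rcases List.mem_cons.mp hmem with heq | hmem'
      · obtain ⟨hm1, hv1⟩ : m = nv.1 ∧ v = nv.2 := by rw [← heq]; exact ⟨rfl, rfl⟩
        subst hm1
        subst hv1
        rw [count_evk_self, count_KE1_zero t nv.1 c hnd.1, Nat.add_zero]
      · have hne : nv.1 ≠ m := by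
          intro he
          exact hnd.1 (he ▸ List.mem_map_of_mem (f := fun p => p.1) hmem')
        rw [count_evk_ne nv m c hne, ih hmem' hnd.2, Nat.zero_add]

-- membership in the flattened key stream
lemma mem_KE2_keys (L : List (String × PySem.Dict String (PySem.Dict String String))) (c k : String) :
    (c, k) ∈ (pvKE2 L).map (·.1) ↔ ∃ nv ∈ L, pvHas c k nv.2 = true := by
  unfold pvKE2
  rw [List.map_map]
  constructor
  · intro h
    obtain ⟨e, he, hq⟩ := List.mem_map.mp h
    rw [pvE, List.mem_flatMap] at he
    obtain ⟨nv, hnv, hev⟩ := he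
    rw [pvEv, List.mem_flatMap] at hev
    obtain ⟨kv, hkv, hm⟩ := hev
    obtain ⟨c', hc', rfl⟩ := List.mem_map.mp hm
    obtain ⟨h1, h2⟩ := Prod.mk.inj hq
    refine ⟨nv, hnv, ?_⟩
    rw [pvHas, List.any_eq_true]
    refine ⟨kv, hkv, ?_⟩
    simp only [Bool.and_eq_true, beq_iff_eq]
    exact ⟨h2, by unfold pvCatP; simp [← h1, hc']⟩
  · rintro ⟨nv, hnv, hhas⟩
    rw [pvHas, List.any_eq_true] at hhas
    obtain ⟨kv, hkv, hb⟩ := hhas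
    simp only [Bool.and_eq_true, beq_iff_eq] at hb
    refine List.mem_map.mpr ⟨(nv.1, kv.1, c), ?_, by simp [hb.1]⟩
    rw [pvE, List.mem_flatMap]
    refine ⟨nv, hnv, ?_⟩
    rw [pvEv, List.mem_flatMap]
    refine ⟨kv, hkv, List.mem_map.mpr ⟨c, ?_, rfl⟩⟩
    have hc2 := hb.2
    unfold pvCatP at hc2
    simpa using hc2

-- a nodup-keyed item list has at most one hit for a fixed key
lemma countP_key_nodup (items : List (String × PySem.Dict String String))
    (hnd : (items.map (·.1)).Nodup) (k : String) (p : String × PySem.Dict String String → Bool) :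
    items.countP (fun kv => kv.1 == k && p kv)
      = if items.any (fun kv => kv.1 == k && p kv) then 1 else 0 := by
  induction items with
  | nil => rfl
  | cons kv t ih =>
      rw [List.map_cons, List.nodup_cons] at hnd
      rw [List.countP_cons, List.any_cons, ih hnd.2]
      by_cases hq : (kv.1 == k && p kv) = true
      · have hk : kv.1 = k := by
          simp only [Bool.and_eq_true, beq_iff_eq] at hq
          exact hq.1
        have hno : ∀ kv' ∈ t, ¬(kv'.1 == k && p kv') = true := by
          intro kv' hkv' hq'
          simp only [Bool.and_eq_true, beq_iff_eq] at hq'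
          refine hnd.1 ?_
          have hmm : kv'.1 ∈ t.map (fun x => x.1) := List.mem_map_of_mem hkv'
          rwa [hq'.1, ← hk] at hmm
        have h0 : t.countP (fun kv => kv.1 == k && p kv) = 0 := List.countP_eq_zero.mpr hno
        have h0' : t.any (fun kv => kv.1 == k && p kv) = false := by
          rw [List.any_eq_false]
          exact hno
        simp [hq, h0, h0']
      · simp only [Bool.eq_false_iff.mpr hq, Bool.false_or]
        simp

-- one model's contribution to a (cat, key) bucket of the inverted index
lemma prod_beq_str (a b x y : String) : ((a, b) == (x, y)) = (a == x && b == y) := rfl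

lemma model_bucket (c k : String) (nv : String × PySem.Dict String (PySem.Dict String String))
    (hk : nv.2.keys.Nodup) :
    (((pvEv nv).map (fun e => ((e.2.2, e.2.1), e.1))).filter (·.1 == (c, k))).map (·.2)
      = if pvHas c k nv.2 then [nv.1] else [] := by
  have hall : ∀ x ∈ ((pvEv nv).map (fun e => ((e.2.2, e.2.1), e.1))).filter (·.1 == (c, k)),
      x = ((c, k), nv.1) := by
    intro x hx
    rw [List.mem_filter] at hx
    obtain ⟨hx1, hx2⟩ := hx
    obtain ⟨e, he, rfl⟩ := List.mem_map.mp hx1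
    have h1 : e.1 = nv.1 := fst_of_mem_pvEv he
    have h2 : (e.2.2, e.2.1) = (c, k) := by simpa using hx2
    simp [h1, h2]
  have hlen : (((pvEv nv).map (fun e => ((e.2.2, e.2.1), e.1))).filter (·.1 == (c, k))).length
      = if pvHas c k nv.2 then 1 else 0 := by
    rw [← List.countP_eq_length_filter, List.countP_map, pvEv, List.countP_flatMap]
    have hcongr : ∀ kv ∈ nv.2.items,
        ((List.countP ((fun x => x.1 == (c, k)) ∘ fun e => ((e.2.2, e.2.1), e.1)))
            ∘ fun kv => (pvCats kv).map (fun c' => (nv.1, kv.1, c'))) kv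
          = if kv.1 == k && pvCatP c kv then 1 else 0 := by
      intro kv _
      show ((pvCats kv).map (fun c' => (nv.1, kv.1, c'))).countP
          ((fun x => x.1 == (c, k)) ∘ fun e => ((e.2.2, e.2.1), e.1))
        = if kv.1 == k && pvCatP c kv then 1 else 0
      rw [List.countP_map]
      have hped : (((fun x : (String × String) × String => x.1 == (c, k))
            ∘ fun e : String × String × String => ((e.2.2, e.2.1), e.1))
            ∘ fun c' : String => (nv.1, kv.1, c'))
          = fun c' => (c' == c && kv.1 == k) := by
        funext c'
        exact prod_beq_str c' kv.1 c k
      rw [hped]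
      by_cases hkk : kv.1 = k
      · have hb : (kv.1 == k) = true := by simp [hkk]
        simp only [hb, Bool.and_true, Bool.true_and]
        have : (pvCats kv).countP (fun c' => c' == c) = (pvCats kv).count c := rfl
        rw [this, count_of_nodup (pvCats_nodup kv) c]
        unfold pvCatP
        by_cases hc : c ∈ pvCats kv
        · rw [if_pos hc, if_pos (by simpa using hc)]
        · rw [if_neg hc, if_neg (by simpa using hc)]
      · have hb : (kv.1 == k) = false := by simp [hkk]
        simp only [hb, Bool.and_false, Bool.false_and, List.countP_false, if_false]
        rfl
    rw [List.map_congr_left hcongr, sum_ite_one_zero_nat,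
      countP_key_nodup nv.2.items hk k (pvCatP c)]
    rfl
  rw [List.eq_replicate_of_mem hall, hlen, List.map_replicate]
  by_cases hp : pvHas c k nv.2 = true
  · rw [if_pos hp, if_pos hp]
    rfl
  · rw [if_neg hp, if_neg hp]
    rfl

-- the (cat,key) bucket lists the models having that key in that cat, in model order
lemma lst_eq (L : List (String × PySem.Dict String (PySem.Dict String String))) (c k : String)
    (hv : ∀ p ∈ L, (p.2 : PySem.Dict String (PySem.Dict String String)).keys.Nodup) :
    ((pvKE2 L).filter (·.1 == (c, k))).map (·.2)
      = (L.filter (fun nv => pvHas c k nv.2)).map (·.1) := by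
  induction L with
  | nil => rfl
  | cons nv t ih =>
      have hKE2 : pvKE2 (nv :: t) = (pvEv nv).map (fun e => ((e.2.2, e.2.1), e.1)) ++ pvKE2 t := by
        simp [pvKE2, pvE, List.flatMap_cons]
      rw [hKE2, List.filter_append, List.map_append,
        model_bucket c k nv (hv nv List.mem_cons_self),
        ih (fun p hp => hv p (List.mem_cons_of_mem _ hp)), List.filter_cons]
      by_cases hp : pvHas c k nv.2 = true
      · rw [if_pos (by simp [hp]), if_pos hp, List.map_cons, List.singleton_append]
      · rw [if_neg (by simp [hp]), if_neg hp, List.nil_append]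

-- the overlap count for one (cat,key) bucket shaped like a filtered name list
lemma count_pairs_split (C1 C2 C3 : List String) (l r : String) (pl pr : Bool)
    (hl1 : l ∉ C1) (hl2 : l ∉ C2) (hl3 : l ∉ C3)
    (hr2 : r ∉ C2) (hr3 : r ∉ C3) (hlr : l ≠ r) :
    (pvPairs (C1 ++ ((if pl then [l] else []) ++ (C2 ++ ((if pr then [r] else []) ++ C3))))).count (l, r)
      = if pl && pr then 1 else 0 := by
  rw [count_pvPairs_append, count_pvPairs_not_mem r hl1, List.count_eq_zero_of_not_mem hl1,
    count_pvPairs_append]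
  have hIl : (pvPairs (if pl then [l] else [])).count (l, r) = 0 := by cases pl <;> rfl
  have hIlc : (if pl then [l] else []).count l = if pl then 1 else 0 := by
    cases pl <;> simp
  have hBr : (C2 ++ ((if pr then [r] else []) ++ C3)).count r = if pr then 1 else 0 := by
    rw [List.count_append, List.count_append, List.count_eq_zero_of_not_mem hr2,
      List.count_eq_zero_of_not_mem hr3]
    cases pr <;> simp
  have hrest : (pvPairs (C2 ++ ((if pr then [r] else []) ++ C3))).count (l, r) = 0 := by
    refine count_pvPairs_not_mem r (fun hm => ?_)
    rcases List.mem_append.mp hm with h | h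
    · exact hl2 h
    rcases List.mem_append.mp h with h | h
    · cases pr <;> simp_all
    · exact hl3 h
  rw [hIl, hIlc, hBr, hrest]
  cases pl <;> cases pr <;> simp

-- ---------- assembled state of port B ----------

def pvLoop1 (L : List (String × PySem.Dict String (PySem.Dict String String))) :
    List String × PySem.Dict (String × String) Int × PySem.Dict (String × String) (List String) :=
  L.foldl
    (fun st nv =>
      (st.1 ++ [nv.1],
       nv.2.items.foldl
         (fun sd kv =>
           (pvBCats (kv.2.get? "final_status")).foldl
             (fun sd cat =>
               (sd.1.modify (nv.1, cat) 0 (· + 1),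
                sd.2.modify (cat, kv.1) [] (· ++ [nv.1])))
             sd)
         st.2))
    (([] : List String), (PySem.Dict.empty : PySem.Dict (String × String) Int),
     (PySem.Dict.empty : PySem.Dict (String × String) (List String)))

def pvSizesD (L : List (String × PySem.Dict String (PySem.Dict String String))) :
    PySem.Dict (String × String) Int :=
  (pvKE1 L).foldl (fun d x => d.modify x 0 (· + 1)) PySem.Dict.empty

def pvSolversD (L : List (String × PySem.Dict String (PySem.Dict String String))) :
    PySem.Dict (String × String) (List String) :=
  (pvKE2 L).foldl (fun d p => d.modify p.1 [] (· ++ [p.2])) PySem.Dict.empty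

def pvOverD (solvers : PySem.Dict (String × String) (List String)) :
    PySem.Dict (String × String × String) Int :=
  solvers.items.foldl
    (fun ov ckl =>
      (PySem.List.enumerate ckl.2).foldl
        (fun ov il =>
          (PySem.List.slice ckl.2 (some (il.1 + 1)) none).foldl
            (fun ov r => ov.modify (il.2, r, ckl.1.1) 0 (· + 1))
            ov)
        ov)
    PySem.Dict.empty

lemma pvLoop1_eq (L : List (String × PySem.Dict String (PySem.Dict String String))) :
    pvLoop1 L = (L.map (·.1), pvSizesD L, pvSolversD L) := loop1_eq L

lemma pvOverD_eq (solvers : PySem.Dict (String × String) (List String)) :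
    pvOverD solvers = (pvP solvers).foldl (fun d x => d.modify x 0 (· + 1)) PySem.Dict.empty :=
  loop2_eq solvers

lemma sizes_getD (L : List (String × PySem.Dict String (PySem.Dict String String))) (x : String × String) :
    (pvSizesD L).getD x 0 = ((pvKE1 L).count x : Int) := by
  rw [pvSizesD, PySem.Dict.getD_foldl_modify_add_one, PySem.Dict.getD_empty, Int.zero_add]

lemma ov_getD (solvers : PySem.Dict (String × String) (List String)) (x : String × String × String) :
    (pvOverD solvers).getD x 0 = ((pvP solvers).count x : Int) := by
  rw [pvOverD_eq, PySem.Dict.getD_foldl_modify_add_one, PySem.Dict.getD_empty, Int.zero_add]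

lemma solvers_getD (L : List (String × PySem.Dict String (PySem.Dict String String))) (ck : String × String) :
    (pvSolversD L).getD ck [] = ((pvKE2 L).filter (·.1 == ck)).map (·.2) := by
  rw [pvSolversD, PySem.Dict.getD_foldl_modify_append, PySem.Dict.getD_empty, List.nil_append]

lemma solvers_keys (L : List (String × PySem.Dict String (PySem.Dict String String))) :
    (pvSolversD L).keys = PySem.Set.ofList ((pvKE2 L).map (fun p => p.1)) := by
  rw [pvSolversD, PySem.Dict.keys_foldl_modify_key (pvKE2 L) (fun p => p.1) []
    (fun _ p => (· ++ [p.2])) PySem.Dict.empty]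
  rfl

-- ---------- shape facts from the nodup name list ----------

lemma nodup_shape {α : Type} {K1 K2 K3 : List α} {l r : α}
    (h : (K1 ++ l :: (K2 ++ r :: K3)).Nodup) :
    l ≠ r ∧ (l ∉ K1 ∧ l ∉ K2 ∧ l ∉ K3) ∧ (r ∉ K1 ∧ r ∉ K2 ∧ r ∉ K3) := by
  simp only [List.nodup_append, List.nodup_cons, List.mem_append, List.mem_cons] at h
  obtain ⟨-, ⟨hl, -, ⟨hr3, -⟩, hK2⟩, hK1⟩ := h
  exact ⟨fun he => hl (Or.inr (Or.inl he)),
    ⟨fun hm => hK1 l hm l (Or.inl rfl) rfl, fun hm => hl (Or.inl hm),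
     fun hm => hl (Or.inr (Or.inr hm))⟩,
    ⟨fun hm => hK1 r hm r (Or.inr (Or.inr (Or.inl rfl))) rfl,
     fun hm => hK2 r hm r (Or.inl rfl) rfl, hr3⟩⟩

lemma not_mem_filter_map {l : String} {M : List (String × PySem.Dict String (PySem.Dict String String))}
    (p : String × PySem.Dict String (PySem.Dict String String) → Bool)
    (h : l ∉ M.map (·.1)) : l ∉ (M.filter p).map (·.1) := by
  intro hm
  obtain ⟨x, hx, rfl⟩ := List.mem_map.mp hm
  exact h (List.mem_map_of_mem (List.mem_of_mem_filter hx))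

lemma filter_map_decomp (M1 M2 M3 : List (String × PySem.Dict String (PySem.Dict String String)))
    (l r : String) (vl vr : PySem.Dict String (PySem.Dict String String))
    (p : String × PySem.Dict String (PySem.Dict String String) → Bool) :
    ((M1 ++ (l, vl) :: M2 ++ (r, vr) :: M3).filter p).map (·.1)
      = (M1.filter p).map (·.1)
          ++ ((if p (l, vl) then [l] else [])
          ++ ((M2.filter p).map (·.1)
          ++ ((if p (r, vr) then [r] else [])
          ++ (M3.filter p).map (·.1)))) := by
  cases hpl : p (l, vl) <;> cases hpr : p (r, vr) <;>
    simp [List.filter_append, List.filter_cons, hpl, hpr]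

-- ---------- the centrepiece: the co-occurrence counter equals the intersection size ----------

lemma overlap_count (M1 M2 M3 : List (String × PySem.Dict String (PySem.Dict String String)))
    (l r : String) (vl vr : PySem.Dict String (PySem.Dict String String)) (c : String)
    (hnd : (((M1 ++ (l, vl) :: M2 ++ (r, vr) :: M3)).map (·.1)).Nodup)
    (hv : ∀ p ∈ M1 ++ (l, vl) :: M2 ++ (r, vr) :: M3,
      (p.2 : PySem.Dict String (PySem.Dict String String)).keys.Nodup) :
    ((pvP (pvSolversD (M1 ++ (l, vl) :: M2 ++ (r, vr) :: M3))).count (l, r, c) : Int)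
      = PySem.Set.len (PySem.Set.inter (PySem.Set.ofList (pvKeys c vl)) (PySem.Set.ofList (pvKeys c vr))) := by
  set L := M1 ++ (l, vl) :: M2 ++ (r, vr) :: M3 with hLdef
  have hmemL : (l, vl) ∈ L ∧ (r, vr) ∈ L := by
    constructor <;> simp [hLdef]
  have hmapL : L.map (·.1) = M1.map (·.1) ++ l :: ((M2.map (·.1)) ++ r :: (M3.map (·.1))) := by
    simp [hLdef]
  have hsh := nodup_shape (by rw [← hmapL]; exact hnd)
  obtain ⟨hlr, ⟨hl1, hl2, hl3⟩, ⟨hr1, hr2, hr3⟩⟩ := hsh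
  have hkeys := solvers_keys L
  have hknd : (pvSolversD L).keys.Nodup := by rw [hkeys]; exact PySem.Set.nodup_ofList _
  have hitems := PySem.Dict.items_eq_map_keys (pvSolversD L) hknd []
  -- the per-bucket count
  have hq : ∀ ck ∈ (pvSolversD L).keys,
      ((pvPairs ((pvSolversD L).getD ck [])).map (fun pr => (pr.1, pr.2, ck.1))).count (l, r, c)
        = if ck.1 == c && (pvHas c ck.2 vl && pvHas c ck.2 vr) then 1 else 0 := by
    rintro ⟨c1, k⟩ hck
    by_cases hc1 : c1 = c
    · subst hc1
      have hinj : Function.Injective (fun pr : String × String => (pr.1, pr.2, c1)) := by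
        intro a b hab
        obtain ⟨h1, h2⟩ := Prod.mk.inj hab
        obtain ⟨h3, -⟩ := Prod.mk.inj h2
        exact Prod.ext h1 h3
      have hcnt := List.count_map_of_injective (pvPairs ((pvSolversD L).getD (c1, k) []))
        (fun pr : String × String => (pr.1, pr.2, c1)) hinj (l, r)
      rw [show ((l, r, c1) : String × String × String)
            = (fun pr : String × String => (pr.1, pr.2, c1)) (l, r) from rfl] at *
      rw [hcnt, solvers_getD L (c1, k), lst_eq L c1 k hv, hLdef, filter_map_decomp]
      have hsplit := count_pairs_split ((M1.filter (fun nv => pvHas c1 k nv.2)).map (·.1))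
        ((M2.filter (fun nv => pvHas c1 k nv.2)).map (·.1))
        ((M3.filter (fun nv => pvHas c1 k nv.2)).map (·.1))
        l r (pvHas c1 k vl) (pvHas c1 k vr)
        (not_mem_filter_map _ hl1) (not_mem_filter_map _ hl2) (not_mem_filter_map _ hl3)
        (not_mem_filter_map _ hr2) (not_mem_filter_map _ hr3) hlr
      rw [hsplit]
      simp
    · rw [List.count_eq_zero.mpr, if_neg (by simp [hc1])]
      intro hm
      obtain ⟨pr, _, hpr⟩ := List.mem_map.mp hm
      obtain ⟨-, h2⟩ := Prod.mk.inj hpr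
      obtain ⟨-, h3⟩ := Prod.mk.inj h2
      exact hc1 h3
  -- sum the buckets
  have hsum : (pvP (pvSolversD L)).count (l, r, c)
      = (pvSolversD L).keys.countP
          (fun ck => ck.1 == c && (pvHas c ck.2 vl && pvHas c ck.2 vr)) := by
    rw [pvP, hitems, List.count_flatMap, List.map_map, List.map_congr_left (by
      intro ck hck
      show ((pvPairs ((pvSolversD L).getD ck [])).map (fun pr => (pr.1, pr.2, ck.1))).count (l, r, c)
        = if (fun ck : String × String => ck.1 == c && (pvHas c ck.2 vl && pvHas c ck.2 vr)) ck then 1 else 0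
      exact hq ck hck), sum_ite_one_zero_nat]
  rw [hsum]
  -- turn the key filter into the intersection list via a permutation
  have hvl : vl.keys.Nodup := hv (l, vl) hmemL.1
  have hvr : vr.keys.Nodup := hv (r, vr) hmemL.2
  set q : String × String → Bool := fun ck => ck.1 == c && (pvHas c ck.2 vl && pvHas c ck.2 vr) with hqdef
  have hBnodup : (((pvSolversD L).keys.filter q).map (·.2)).Nodup := by
    refine List.Nodup.map_on ?_ (hknd.filter q)
    intro x hx y hy hxy
    have hx1 : x.1 = c := by
      have := (List.mem_filter.mp hx).2
      rw [hqdef] at this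
      simp only [Bool.and_eq_true, beq_iff_eq] at this
      exact this.1
    have hy1 : y.1 = c := by
      have := (List.mem_filter.mp hy).2
      rw [hqdef] at this
      simp only [Bool.and_eq_true, beq_iff_eq] at this
      exact this.1
    exact Prod.ext (hx1.trans hy1.symm) hxy
  have hAnodup : (PySem.Set.inter (PySem.Set.ofList (pvKeys c vl)) (PySem.Set.ofList (pvKeys c vr))).Nodup :=
    PySem.Set.nodup_inter _ _ (PySem.Set.nodup_ofList _)
  have hmemiff : ∀ x, x ∈ ((pvSolversD L).keys.filter q).map (·.2)
      ↔ x ∈ PySem.Set.inter (PySem.Set.ofList (pvKeys c vl)) (PySem.Set.ofList (pvKeys c vr)) := by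
    intro x
    rw [PySem.Set.mem_inter, PySem.Set.mem_ofList, PySem.Set.mem_ofList, mem_pvKeys, mem_pvKeys]
    constructor
    · intro hm
      obtain ⟨ck, hck, rfl⟩ := List.mem_map.mp hm
      have hq' := (List.mem_filter.mp hck).2
      rw [hqdef] at hq'
      simp only [Bool.and_eq_true, beq_iff_eq] at hq'
      exact ⟨hq'.2.1, hq'.2.2⟩
    · rintro ⟨hx1, hx2⟩
      refine List.mem_map.mpr ⟨(c, x), List.mem_filter.mpr ⟨?_, ?_⟩, rfl⟩
      · rw [hkeys, PySem.Set.mem_ofList, mem_KE2_keys]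
        exact ⟨(l, vl), hmemL.1, hx1⟩
      · rw [hqdef]
        simp [hx1, hx2]
  have hperm : (((pvSolversD L).keys.filter q).map (·.2)).Perm
      (PySem.Set.inter (PySem.Set.ofList (pvKeys c vl)) (PySem.Set.ofList (pvKeys c vr))) :=
    (List.perm_ext_iff_of_nodup hBnodup hAnodup).mpr hmemiff
  rw [PySem.Set.len, ← hperm.length_eq, List.length_map, List.countP_eq_length_filter]

-- ---------- A-side derived dictionaries (definitionally the port's intermediates) ----------

def pvSetsD (md : PySem.Dict String (PySem.Dict String (PySem.Dict String String))) :
    PySem.Dict String (PySem.Dict String (PySem.Set String)) :=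
  PySem.Dict.ofList (md.items.map (fun p => (p.1, status_sets p.2)))

def pvKbD (md : PySem.Dict String (PySem.Dict String (PySem.Dict String String))) :
    PySem.Dict String (PySem.Set String) :=
  PySem.Dict.ofList (md.items.map (fun p => (p.1, solved_kb_set p.2)))

lemma len_keys (c : String) (v : PySem.Dict String (PySem.Dict String String)) (h : v.keys.Nodup) :
    PySem.Set.len (PySem.Set.ofList (pvKeys c v)) = (v.items.countP (pvCatP c) : Int) := by
  rw [PySem.Set.ofList_eq_self_of_nodup _ (nodup_pvKeys h), PySem.Set.len, pvKeys,
    List.length_map, ← List.countP_eq_length_filter]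

-- ---------- one row ----------

lemma row_eq (md : PySem.Dict String (PySem.Dict String (PySem.Dict String String)))
    (hnd : md.keys.Nodup) (hv : ∀ p ∈ md.items, (p.2 : PySem.Dict String (PySem.Dict String String)).keys.Nodup)
    (M1 M2 M3 : List (String × PySem.Dict String (PySem.Dict String String)))
    (l r : String) (vl vr : PySem.Dict String (PySem.Dict String String))
    (hL : md.items = M1 ++ (l, vl) :: M2 ++ (r, vr) :: M3) :
    (PySem.Dict.empty.insert "kb_solved_overlap"
        (PySem.Set.len (PySem.Set.inter ((pvKbD md).getD l PySem.Set.empty) ((pvKbD md).getD r PySem.Set.empty)))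
      |>.insert ("kb_solved_only_" ++ l) (PySem.Set.len (PySem.Set.diff ((pvKbD md).getD l PySem.Set.empty) ((pvKbD md).getD r PySem.Set.empty)))
      |>.insert ("kb_solved_only_" ++ r) (PySem.Set.len (PySem.Set.diff ((pvKbD md).getD r PySem.Set.empty) ((pvKbD md).getD l PySem.Set.empty)))
      |>.insert "raw_overlap" (PySem.Set.len (PySem.Set.inter (((pvSetsD md).getD l PySem.Dict.empty).getD "raw_kb_solved" PySem.Set.empty) (((pvSetsD md).getD r PySem.Dict.empty).getD "raw_kb_solved" PySem.Set.empty)))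
      |>.insert ("raw_only_" ++ l) (PySem.Set.len (PySem.Set.diff (((pvSetsD md).getD l PySem.Dict.empty).getD "raw_kb_solved" PySem.Set.empty) (((pvSetsD md).getD r PySem.Dict.empty).getD "raw_kb_solved" PySem.Set.empty)))
      |>.insert ("raw_only_" ++ r) (PySem.Set.len (PySem.Set.diff (((pvSetsD md).getD r PySem.Dict.empty).getD "raw_kb_solved" PySem.Set.empty) (((pvSetsD md).getD l PySem.Dict.empty).getD "raw_kb_solved" PySem.Set.empty)))
      |>.insert "normalised_overlap" (PySem.Set.len (PySem.Set.inter (((pvSetsD md).getD l PySem.Dict.empty).getD "normalised_kb_solved" PySem.Set.empty) (((pvSetsD md).getD r PySem.Dict.empty).getD "normalised_kb_solved" PySem.Set.empty)))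
      |>.insert ("normalised_only_" ++ l) (PySem.Set.len (PySem.Set.diff (((pvSetsD md).getD l PySem.Dict.empty).getD "normalised_kb_solved" PySem.Set.empty) (((pvSetsD md).getD r PySem.Dict.empty).getD "normalised_kb_solved" PySem.Set.empty)))
      |>.insert ("normalised_only_" ++ r) (PySem.Set.len (PySem.Set.diff (((pvSetsD md).getD r PySem.Dict.empty).getD "normalised_kb_solved" PySem.Set.empty) (((pvSetsD md).getD l PySem.Dict.empty).getD "normalised_kb_solved" PySem.Set.empty))))
    = pvCatSpec.foldl
        (fun (row : PySem.Dict String Int) c =>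
          ((row.insert c.2.1 ((pvOverD (pvSolversD md.items)).getD (l, r, c.1) 0)).insert
            (c.2.2 ++ "_" ++ l) ((pvSizesD md.items).getD (l, c.1) 0 - (pvOverD (pvSolversD md.items)).getD (l, r, c.1) 0)).insert
            (c.2.2 ++ "_" ++ r) ((pvSizesD md.items).getD (r, c.1) 0 - (pvOverD (pvSolversD md.items)).getD (l, r, c.1) 0))
        PySem.Dict.empty := by
  have hmem_l : (l, vl) ∈ md.items := by rw [hL]; simp
  have hmem_r : (r, vr) ∈ md.items := by rw [hL]; simp
  have hndm : (md.items.map (fun p => p.1)).Nodup := hnd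
  have hvl : vl.keys.Nodup := hv _ hmem_l
  have hvr : vr.keys.Nodup := hv _ hmem_r
  have e1 : (pvKbD md).getD l PySem.Set.empty = solved_kb_set vl :=
    getD_map_ofList md.items solved_kb_set l vl PySem.Set.empty hndm hmem_l
  have e2 : (pvKbD md).getD r PySem.Set.empty = solved_kb_set vr :=
    getD_map_ofList md.items solved_kb_set r vr PySem.Set.empty hndm hmem_r
  have e3 : (pvSetsD md).getD l PySem.Dict.empty = status_sets vl :=
    getD_map_ofList md.items status_sets l vl PySem.Dict.empty hndm hmem_l
  have e4 : (pvSetsD md).getD r PySem.Dict.empty = status_sets vr :=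
    getD_map_ofList md.items status_sets r vr PySem.Dict.empty hndm hmem_r
  have hndL : (((M1 ++ (l, vl) :: M2 ++ (r, vr) :: M3)).map (·.1)).Nodup := by
    rw [← hL]; exact hndm
  have hvL : ∀ p ∈ M1 ++ (l, vl) :: M2 ++ (r, vr) :: M3,
      (p.2 : PySem.Dict String (PySem.Dict String String)).keys.Nodup := by
    rw [← hL]; exact hv
  have hov : ∀ c : String, (pvOverD (pvSolversD md.items)).getD (l, r, c) 0
      = PySem.Set.len (PySem.Set.inter (PySem.Set.ofList (pvKeys c vl)) (PySem.Set.ofList (pvKeys c vr))) := by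
    intro c
    rw [ov_getD, hL]
    exact overlap_count M1 M2 M3 l r vl vr c hndL hvL
  have hsz_l : ∀ c : String, (pvSizesD md.items).getD (l, c) 0
      = PySem.Set.len (PySem.Set.ofList (pvKeys c vl)) := by
    intro c
    rw [sizes_getD, count_KE1_of md.items l vl c hmem_l hndm, ← len_keys c vl hvl]
  have hsz_r : ∀ c : String, (pvSizesD md.items).getD (r, c) 0
      = PySem.Set.len (PySem.Set.ofList (pvKeys c vr)) := by
    intro c
    rw [sizes_getD, count_KE1_of md.items r vr c hmem_r hndm, ← len_keys c vr hvr]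
  rw [e1, e2, e3, e4, solved_kb_set_eq, solved_kb_set_eq, bucket_raw, bucket_raw,
    bucket_norm, bucket_norm, diff_len, diff_len, diff_len, diff_len, diff_len, diff_len,
    inter_len_comm (PySem.Set.ofList (pvKeys "kb_solved" vr)) (PySem.Set.ofList (pvKeys "kb_solved" vl))
      (PySem.Set.nodup_ofList _) (PySem.Set.nodup_ofList _),
    inter_len_comm (PySem.Set.ofList (pvKeys "raw" vr)) (PySem.Set.ofList (pvKeys "raw" vl))
      (PySem.Set.nodup_ofList _) (PySem.Set.nodup_ofList _),
    inter_len_comm (PySem.Set.ofList (pvKeys "normalised" vr)) (PySem.Set.ofList (pvKeys "normalised" vl))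
      (PySem.Set.nodup_ofList _) (PySem.Set.nodup_ofList _)]
  simp only [pvCatSpec, List.foldl_cons, List.foldl_nil]
  rw [hov, hov, hov, hsz_l, hsz_l, hsz_l, hsz_r, hsz_r, hsz_r,
    show ("kb_solved_only" ++ "_" : String) = "kb_solved_only_" from rfl,
    show ("raw_only" ++ "_" : String) = "raw_only_" from rfl,
    show ("normalised_only" ++ "_" : String) = "normalised_only_" from rfl]

-- ---------- the whole pipeline ----------

lemma main_eq (md : PySem.Dict String (PySem.Dict String (PySem.Dict String String)))
    (hnd : md.keys.Nodup)
    (hv : ∀ p ∈ md.items, (p.2 : PySem.Dict String (PySem.Dict String String)).keys.Nodup) :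
    (((PySem.List.enumerate md.keys).foldl (fun rows il =>
        (PySem.List.slice md.keys (some (il.1 + 1)) none).foldl (fun rows right =>
          rows.insert (il.2 ++ "_vs_" ++ right)
            (PySem.Dict.empty.insert "kb_solved_overlap"
                (PySem.Set.len (PySem.Set.inter ((pvKbD md).getD il.2 PySem.Set.empty) ((pvKbD md).getD right PySem.Set.empty)))
              |>.insert ("kb_solved_only_" ++ il.2) (PySem.Set.len (PySem.Set.diff ((pvKbD md).getD il.2 PySem.Set.empty) ((pvKbD md).getD right PySem.Set.empty)))
              |>.insert ("kb_solved_only_" ++ right) (PySem.Set.len (PySem.Set.diff ((pvKbD md).getD right PySem.Set.empty) ((pvKbD md).getD il.2 PySem.Set.empty)))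
              |>.insert "raw_overlap" (PySem.Set.len (PySem.Set.inter (((pvSetsD md).getD il.2 PySem.Dict.empty).getD "raw_kb_solved" PySem.Set.empty) (((pvSetsD md).getD right PySem.Dict.empty).getD "raw_kb_solved" PySem.Set.empty)))
              |>.insert ("raw_only_" ++ il.2) (PySem.Set.len (PySem.Set.diff (((pvSetsD md).getD il.2 PySem.Dict.empty).getD "raw_kb_solved" PySem.Set.empty) (((pvSetsD md).getD right PySem.Dict.empty).getD "raw_kb_solved" PySem.Set.empty)))
              |>.insert ("raw_only_" ++ right) (PySem.Set.len (PySem.Set.diff (((pvSetsD md).getD right PySem.Dict.empty).getD "raw_kb_solved" PySem.Set.empty) (((pvSetsD md).getD il.2 PySem.Dict.empty).getD "raw_kb_solved" PySem.Set.empty)))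
              |>.insert "normalised_overlap" (PySem.Set.len (PySem.Set.inter (((pvSetsD md).getD il.2 PySem.Dict.empty).getD "normalised_kb_solved" PySem.Set.empty) (((pvSetsD md).getD right PySem.Dict.empty).getD "normalised_kb_solved" PySem.Set.empty)))
              |>.insert ("normalised_only_" ++ il.2) (PySem.Set.len (PySem.Set.diff (((pvSetsD md).getD il.2 PySem.Dict.empty).getD "normalised_kb_solved" PySem.Set.empty) (((pvSetsD md).getD right PySem.Dict.empty).getD "normalised_kb_solved" PySem.Set.empty)))
              |>.insert ("normalised_only_" ++ right) (PySem.Set.len (PySem.Set.diff (((pvSetsD md).getD right PySem.Dict.empty).getD "normalised_kb_solved" PySem.Set.empty) (((pvSetsD md).getD il.2 PySem.Dict.empty).getD "normalised_kb_solved" PySem.Set.empty)))))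
        rows)
        PySem.Dict.empty).items.map (fun p => (p.1, p.2.items)))
    = (((PySem.List.enumerate (pvLoop1 md.items).1).foldl (fun rows il =>
        (PySem.List.slice (pvLoop1 md.items).1 (some (il.1 + 1)) none).foldl (fun rows right =>
          rows.insert (il.2 ++ "_vs_" ++ right)
            (pvCatSpec.foldl
              (fun (row : PySem.Dict String Int) c =>
                ((row.insert c.2.1 ((pvOverD (pvLoop1 md.items).2.2).getD (il.2, right, c.1) 0)).insert
                  (c.2.2 ++ "_" ++ il.2) ((pvLoop1 md.items).2.1.getD (il.2, c.1) 0 - (pvOverD (pvLoop1 md.items).2.2).getD (il.2, right, c.1) 0)).insert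
                  (c.2.2 ++ "_" ++ right) ((pvLoop1 md.items).2.1.getD (right, c.1) 0 - (pvOverD (pvLoop1 md.items).2.2).getD (il.2, right, c.1) 0))
              PySem.Dict.empty))
          rows)
        PySem.Dict.empty).items.map (fun p => (p.1, p.2.items))) := by
  simp only [pvLoop1_eq]
  have hkeys : (md.items.map (·.1)) = md.keys := rfl
  rw [hkeys]
  refine congrArg (fun d : PySem.Dict String (PySem.Dict String Int) =>
    d.items.map (fun p => (p.1, p.2.items))) ?_
  have hA := pv_enum_slice_foldl (γ := PySem.Dict String (PySem.Dict String Int)) md.keys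
    (fun rows left right =>
      rows.insert (left ++ "_vs_" ++ right)
        (PySem.Dict.empty.insert "kb_solved_overlap"
            (PySem.Set.len (PySem.Set.inter ((pvKbD md).getD left PySem.Set.empty) ((pvKbD md).getD right PySem.Set.empty)))
          |>.insert ("kb_solved_only_" ++ left) (PySem.Set.len (PySem.Set.diff ((pvKbD md).getD left PySem.Set.empty) ((pvKbD md).getD right PySem.Set.empty)))
          |>.insert ("kb_solved_only_" ++ right) (PySem.Set.len (PySem.Set.diff ((pvKbD md).getD right PySem.Set.empty) ((pvKbD md).getD left PySem.Set.empty)))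
          |>.insert "raw_overlap" (PySem.Set.len (PySem.Set.inter (((pvSetsD md).getD left PySem.Dict.empty).getD "raw_kb_solved" PySem.Set.empty) (((pvSetsD md).getD right PySem.Dict.empty).getD "raw_kb_solved" PySem.Set.empty)))
          |>.insert ("raw_only_" ++ left) (PySem.Set.len (PySem.Set.diff (((pvSetsD md).getD left PySem.Dict.empty).getD "raw_kb_solved" PySem.Set.empty) (((pvSetsD md).getD right PySem.Dict.empty).getD "raw_kb_solved" PySem.Set.empty)))
          |>.insert ("raw_only_" ++ right) (PySem.Set.len (PySem.Set.diff (((pvSetsD md).getD right PySem.Dict.empty).getD "raw_kb_solved" PySem.Set.empty) (((pvSetsD md).getD left PySem.Dict.empty).getD "raw_kb_solved" PySem.Set.empty)))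
          |>.insert "normalised_overlap" (PySem.Set.len (PySem.Set.inter (((pvSetsD md).getD left PySem.Dict.empty).getD "normalised_kb_solved" PySem.Set.empty) (((pvSetsD md).getD right PySem.Dict.empty).getD "normalised_kb_solved" PySem.Set.empty)))
          |>.insert ("normalised_only_" ++ left) (PySem.Set.len (PySem.Set.diff (((pvSetsD md).getD left PySem.Dict.empty).getD "normalised_kb_solved" PySem.Set.empty) (((pvSetsD md).getD right PySem.Dict.empty).getD "normalised_kb_solved" PySem.Set.empty)))
          |>.insert ("normalised_only_" ++ right) (PySem.Set.len (PySem.Set.diff (((pvSetsD md).getD right PySem.Dict.empty).getD "normalised_kb_solved" PySem.Set.empty) (((pvSetsD md).getD left PySem.Dict.empty).getD "normalised_kb_solved" PySem.Set.empty)))))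
    PySem.Dict.empty
  have hB := pv_enum_slice_foldl (γ := PySem.Dict String (PySem.Dict String Int)) md.keys
    (fun rows left right =>
      rows.insert (left ++ "_vs_" ++ right)
        (pvCatSpec.foldl
          (fun (row : PySem.Dict String Int) c =>
            ((row.insert c.2.1 ((pvOverD (pvSolversD md.items)).getD (left, right, c.1) 0)).insert
              (c.2.2 ++ "_" ++ left) ((pvSizesD md.items).getD (left, c.1) 0 - (pvOverD (pvSolversD md.items)).getD (left, right, c.1) 0)).insert
              (c.2.2 ++ "_" ++ right) ((pvSizesD md.items).getD (right, c.1) 0 - (pvOverD (pvSolversD md.items)).getD (left, right, c.1) 0))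
          PySem.Dict.empty))
    PySem.Dict.empty
  rw [hA, hB]
  apply PySem.List.foldl_congr_mem
  intro rows pr hpr
  have hpr' : (pr.1, pr.2) ∈ pvPairs (md.items.map (fun p => p.1)) := by
    rw [hkeys]
    simpa using hpr
  rw [pvPairs_map] at hpr'
  obtain ⟨pq, hpq, hpqe⟩ := List.mem_map.mp hpr'
  obtain ⟨⟨a, va⟩, ⟨b, vb⟩⟩ := pq
  have hab : (a, b) = (pr.1, pr.2) := hpqe
  obtain ⟨h1, h2⟩ := Prod.mk.inj hab
  subst h1
  subst h2
  obtain ⟨M1, M2, M3, hLd⟩ := mem_pvPairs hpq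
  refine congrArg (fun row => PySem.Dict.insert rows (pr.1 ++ "_vs_" ++ pr.2) row) ?_
  exact row_eq md hnd hv M1 M2 M3 pr.1 pr.2 va vb hLd

-- ===== VERDICT (by name: the statement is the Claim_ definition above) =====
set_option maxHeartbeats 2000000 in
theorem pairwise_outcomes_spec : Claim_equal_pairwise_outcomes := by
  intro models _
  show pairwise_outcomes models = pairwise_outcomes_alt models
  have h := main_eq
    (PySem.Dict.ofList (models.map (fun p => (p.1, PySem.Dict.ofList (p.2.map (fun q => (q.1, PySem.Dict.ofList q.2)))))))
    (PySem.Dict.nodup_keys_ofList _)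
    (fun p hp => by
      obtain ⟨q, _, hq⟩ := List.mem_map.mp (mem_items_ofList_sub _ hp)
      rw [← hq]
      exact PySem.Dict.nodup_keys_ofList _)
  simp only [pvKbD, pvSetsD, pvLoop1, pvOverD] at h
  simp only [pairwise_outcomes, pairwise_outcomes_alt]
  exact h
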